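-- pv_equiv track=rewrite | github.com/amirrezavishteh/Artificial-intelligence-exercises | HW0/Codes/agent.py | winestates
-- ===== SOURCE A (Python) =====
-- def winestates(i,condition):
--     idwine=[(0,1,2,3),(1,2,3,4),(6,7,8,9),(10,11,12,13),(11,12,13,14),(15,16,17,18),(16,17,18,19),(20,21,22,23),(21,22,23,24)
--             ,(0,5,10,15),(5,10,15,20),(1,6,11,16),(6,11,16,21),(2,7,12,17),(7,12,17,22),(3,8,13,18),(8,13,18,23),(4,9,14,19),(9,14,19,24)
--             ,(0,6,12,18),(6,12,18,24),(4,8,12,16),(8,12,16,20),(1,7,13,19),(5,11,17,23),(3,7,11,15),(9,13,17,21)]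
--     listwine=[]
--     for  con in idwine:
--         if i in con:
--                 listwine.append(con)
--     return listwine
-- ===== SOURCE B (Python) =====
-- # Precomputed literal table: index -> winning lines containing it (derived once from the 27 tuples).
-- _winemap = {
--     0: [(0, 1, 2, 3), (0, 5, 10, 15), (0, 6, 12, 18)],
--     1: [(0, 1, 2, 3), (1, 2, 3, 4), (1, 6, 11, 16), (1, 7, 13, 19)],
--     2: [(0, 1, 2, 3), (1, 2, 3, 4), (2, 7, 12, 17)],
--     3: [(0, 1, 2, 3), (1, 2, 3, 4), (3, 8, 13, 18), (3, 7, 11, 15)],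
--     4: [(1, 2, 3, 4), (4, 9, 14, 19), (4, 8, 12, 16)],
--     5: [(0, 5, 10, 15), (5, 10, 15, 20), (5, 11, 17, 23)],
--     6: [(6, 7, 8, 9), (1, 6, 11, 16), (6, 11, 16, 21), (0, 6, 12, 18), (6, 12, 18, 24)],
--     7: [(6, 7, 8, 9), (2, 7, 12, 17), (7, 12, 17, 22), (1, 7, 13, 19), (3, 7, 11, 15)],
--     8: [(6, 7, 8, 9), (3, 8, 13, 18), (8, 13, 18, 23), (4, 8, 12, 16), (8, 12, 16, 20)],
--     9: [(6, 7, 8, 9), (4, 9, 14, 19), (9, 14, 19, 24), (9, 13, 17, 21)],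
--     10: [(10, 11, 12, 13), (0, 5, 10, 15), (5, 10, 15, 20)],
--     11: [(10, 11, 12, 13), (11, 12, 13, 14), (1, 6, 11, 16), (6, 11, 16, 21), (5, 11, 17, 23), (3, 7, 11, 15)],
--     12: [(10, 11, 12, 13), (11, 12, 13, 14), (2, 7, 12, 17), (7, 12, 17, 22), (0, 6, 12, 18), (6, 12, 18, 24), (4, 8, 12, 16), (8, 12, 16, 20)],
--     13: [(10, 11, 12, 13), (11, 12, 13, 14), (3, 8, 13, 18), (8, 13, 18, 23), (1, 7, 13, 19), (9, 13, 17, 21)],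
--     14: [(11, 12, 13, 14), (4, 9, 14, 19), (9, 14, 19, 24)],
--     15: [(15, 16, 17, 18), (0, 5, 10, 15), (5, 10, 15, 20), (3, 7, 11, 15)],
--     16: [(15, 16, 17, 18), (16, 17, 18, 19), (1, 6, 11, 16), (6, 11, 16, 21), (4, 8, 12, 16), (8, 12, 16, 20)],
--     17: [(15, 16, 17, 18), (16, 17, 18, 19), (2, 7, 12, 17), (7, 12, 17, 22), (5, 11, 17, 23), (9, 13, 17, 21)],
--     18: [(15, 16, 17, 18), (16, 17, 18, 19), (3, 8, 13, 18), (8, 13, 18, 23), (0, 6, 12, 18), (6, 12, 18, 24)],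
--     19: [(16, 17, 18, 19), (4, 9, 14, 19), (9, 14, 19, 24), (1, 7, 13, 19)],
--     20: [(20, 21, 22, 23), (5, 10, 15, 20), (8, 12, 16, 20)],
--     21: [(20, 21, 22, 23), (21, 22, 23, 24), (6, 11, 16, 21), (9, 13, 17, 21)],
--     22: [(20, 21, 22, 23), (21, 22, 23, 24), (7, 12, 17, 22)],
--     23: [(20, 21, 22, 23), (21, 22, 23, 24), (8, 13, 18, 23), (5, 11, 17, 23)],
--     24: [(21, 22, 23, 24), (9, 14, 19, 24), (6, 12, 18, 24)],
-- }
--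
-- def winestates(i, condition):
--     return list(_winemap.get(i, []))
-- ===== Notes on version B (the rewrite author's own statement) =====
-- stated objective: idiomatic
-- what changed: B replaces the per-call scan with membership tests over the 27 win tuples by a module-level precomputed literal dict mapping each board index to the winning lines containing it; the function body is a single table lookup.
import Mathlib
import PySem

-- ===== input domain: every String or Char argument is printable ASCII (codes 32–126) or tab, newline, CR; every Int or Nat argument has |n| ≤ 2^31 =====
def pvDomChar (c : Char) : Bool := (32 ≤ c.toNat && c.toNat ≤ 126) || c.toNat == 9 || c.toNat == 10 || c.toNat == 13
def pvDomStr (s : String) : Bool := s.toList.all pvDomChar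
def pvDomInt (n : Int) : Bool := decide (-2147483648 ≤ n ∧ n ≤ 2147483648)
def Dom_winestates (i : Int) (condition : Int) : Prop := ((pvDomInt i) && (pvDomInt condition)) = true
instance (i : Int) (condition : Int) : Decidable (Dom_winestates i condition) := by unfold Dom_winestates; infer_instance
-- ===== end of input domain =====

set_option maxRecDepth 8192

-- B replaces the per-call scan of the 27 win tuples by a precomputed literal table from index to its winning lines; the function body is a single lookup (idiomatic).


-- ===== PORT A =====
-- A's local constant list of the 27 winning tuples
def pvIdwine : List (Int × Int × Int × Int) :=
  [(0,1,2,3),(1,2,3,4),(6,7,8,9),(10,11,12,13),(11,12,13,14),(15,16,17,18),(16,17,18,19),(20,21,22,23),(21,22,23,24)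
  ,(0,5,10,15),(5,10,15,20),(1,6,11,16),(6,11,16,21),(2,7,12,17),(7,12,17,22),(3,8,13,18),(8,13,18,23),(4,9,14,19),(9,14,19,24)
  ,(0,6,12,18),(6,12,18,24),(4,8,12,16),(8,12,16,20),(1,7,13,19),(5,11,17,23),(3,7,11,15),(9,13,17,21)]

-- per-call loop over idwine with a membership test, appending matches
def winestates (i : Int) (condition : Int) : List (Int × Int × Int × Int) :=
  pvIdwine.foldl
    (fun listwine con =>
      if i = con.1 ∨ i = con.2.1 ∨ i = con.2.2.1 ∨ i = con.2.2.2 then listwine ++ [con] else listwine)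
    []

-- ===== PORT B =====
-- B's module-level literal dict: index -> the winning lines containing it
def pvWinemap : PySem.Dict Int (List (Int × Int × Int × Int)) :=
  PySem.Dict.mk [
  (0, [(0,1,2,3),(0,5,10,15),(0,6,12,18)]),
  (1, [(0,1,2,3),(1,2,3,4),(1,6,11,16),(1,7,13,19)]),
  (2, [(0,1,2,3),(1,2,3,4),(2,7,12,17)]),
  (3, [(0,1,2,3),(1,2,3,4),(3,8,13,18),(3,7,11,15)]),
  (4, [(1,2,3,4),(4,9,14,19),(4,8,12,16)]),
  (5, [(0,5,10,15),(5,10,15,20),(5,11,17,23)]),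
  (6, [(6,7,8,9),(1,6,11,16),(6,11,16,21),(0,6,12,18),(6,12,18,24)]),
  (7, [(6,7,8,9),(2,7,12,17),(7,12,17,22),(1,7,13,19),(3,7,11,15)]),
  (8, [(6,7,8,9),(3,8,13,18),(8,13,18,23),(4,8,12,16),(8,12,16,20)]),
  (9, [(6,7,8,9),(4,9,14,19),(9,14,19,24),(9,13,17,21)]),
  (10, [(10,11,12,13),(0,5,10,15),(5,10,15,20)]),
  (11, [(10,11,12,13),(11,12,13,14),(1,6,11,16),(6,11,16,21),(5,11,17,23),(3,7,11,15)]),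
  (12, [(10,11,12,13),(11,12,13,14),(2,7,12,17),(7,12,17,22),(0,6,12,18),(6,12,18,24),(4,8,12,16),(8,12,16,20)]),
  (13, [(10,11,12,13),(11,12,13,14),(3,8,13,18),(8,13,18,23),(1,7,13,19),(9,13,17,21)]),
  (14, [(11,12,13,14),(4,9,14,19),(9,14,19,24)]),
  (15, [(15,16,17,18),(0,5,10,15),(5,10,15,20),(3,7,11,15)]),
  (16, [(15,16,17,18),(16,17,18,19),(1,6,11,16),(6,11,16,21),(4,8,12,16),(8,12,16,20)]),
  (17, [(15,16,17,18),(16,17,18,19),(2,7,12,17),(7,12,17,22),(5,11,17,23),(9,13,17,21)]),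
  (18, [(15,16,17,18),(16,17,18,19),(3,8,13,18),(8,13,18,23),(0,6,12,18),(6,12,18,24)]),
  (19, [(16,17,18,19),(4,9,14,19),(9,14,19,24),(1,7,13,19)]),
  (20, [(20,21,22,23),(5,10,15,20),(8,12,16,20)]),
  (21, [(20,21,22,23),(21,22,23,24),(6,11,16,21),(9,13,17,21)]),
  (22, [(20,21,22,23),(21,22,23,24),(7,12,17,22)]),
  (23, [(20,21,22,23),(21,22,23,24),(8,13,18,23),(5,11,17,23)]),
  (24, [(21,22,23,24),(9,14,19,24),(6,12,18,24)])]

-- function body: a single lookup, no loop, no membership test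
def winestates_alt (i : Int) (condition : Int) : List (Int × Int × Int × Int) :=
  pvWinemap.getD i []

-- ===== PRECONDITION & SPEC =====
def Spec_winestates (i : Int) (condition : Int) (out : List (Int × Int × Int × Int)) : Prop := out = winestates_alt i condition
instance (i : Int) (condition : Int) (out : List (Int × Int × Int × Int)) : Decidable (Spec_winestates i condition out) := by unfold Spec_winestates; infer_instance

-- ===== CLAIM =====
def Claim_equal_winestates : Prop := ∀ (i : Int) (condition : Int), Dom_winestates i condition → Spec_winestates i condition (winestates i condition)

-- ===== LEMMAS AND PROOFS =====
theorem winestates_eq_inrange (i : Int) (h1 : 0 ≤ i) (h2 : i ≤ 24) :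
    winestates i 0 = winestates_alt i 0 := by
  interval_cases i <;> decide

theorem foldl_if_none {T : Type} (P : T → Prop) [DecidablePred P] :
    ∀ (xs : List T) (acc : List T), (∀ con ∈ xs, ¬ P con) →
      xs.foldl (fun acc con => if P con then acc ++ [con] else acc) acc = acc := by
  intro xs
  induction xs with
  | nil => intro acc _; rfl
  | cons x xs ih =>
      intro acc h
      simp only [List.foldl_cons, if_neg (h x (List.mem_cons_self))]
      exact ih acc (fun c hc => h c (List.mem_cons_of_mem _ hc))

theorem winestates_eq_outrange (i : Int) (h : i < 0 ∨ 24 < i) (condition : Int) :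
    winestates i condition = winestates_alt i condition := by
  have hA : winestates i condition = [] := by
    apply foldl_if_none
    intro con hcon
    fin_cases hcon <;> norm_num <;> omega
  have hkeys : ∀ k ∈ pvWinemap.keys, 0 ≤ k ∧ k ≤ 24 := by decide
  have hnm : i ∉ pvWinemap.keys := fun hm => by have := hkeys i hm; omega
  have hB : winestates_alt i condition = [] := by
    unfold winestates_alt
    rw [PySem.Dict.getD_eq_get?_getD, (PySem.Dict.get?_eq_none_iff_not_mem_keys _ _).mpr hnm]
    rfl
  rw [hA, hB]

-- ===== VERDICT =====
theorem winestates_spec : Claim_equal_winestates := by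
  intro i condition _hDom
  unfold Spec_winestates
  by_cases h : 0 ≤ i ∧ i ≤ 24
  · calc winestates i condition = winestates i 0 := rfl
      _ = winestates_alt i 0 := winestates_eq_inrange i h.1 h.2
      _ = winestates_alt i condition := rfl
  · exact winestates_eq_outrange i (by omega) condition
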